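-- pv_equiv track=rewrite | github.com/Morelitea/initiative | backend/app/schemas/automation.py | validate_flow_graph
-- ===== SOURCE A (Python) =====
-- from collections import defaultdict, deque
-- from typing import Any, List, Optional
--
-- def validate_flow_graph(flow_data: dict[str, Any]) -> list[str]:
--     """Validate a flow graph structure.
--
--     Checks:
--     - ``nodes`` is a non-empty list.
--     - Exactly one node has ``type == "trigger"``.
--     - The graph defined by ``edges`` is acyclic (topological sort).
--
--     Returns a list of warning strings. An empty list means the graph is valid.
--     Raises nothing — callers decide whether warnings are fatal.
--     """
--     warnings: list[str] = []
--
--     nodes: list[dict[str, Any]] = flow_data.get("nodes", [])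
--     edges: list[dict[str, Any]] = flow_data.get("edges", [])
--
--     if not nodes:
--         warnings.append("Flow must contain at least one node.")
--         return warnings
--
--     # -- trigger count --
--     trigger_nodes = [n for n in nodes if n.get("type") == "trigger"]
--     if len(trigger_nodes) == 0:
--         warnings.append("Flow must contain exactly one trigger node.")
--     elif len(trigger_nodes) > 1:
--         warnings.append(
--             f"Flow contains {len(trigger_nodes)} trigger nodes; "
--             "exactly one is required."
--         )
--
--     # -- cycle detection via Kahn's algorithm --
--     node_ids = {n.get("id") for n in nodes if n.get("id") is not None}
--     adjacency: dict[Any, list[Any]] = defaultdict(list)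
--     in_degree: dict[Any, int] = {nid: 0 for nid in node_ids}
--
--     for edge in edges:
--         src = edge.get("source")
--         tgt = edge.get("target")
--         if src in node_ids and tgt in node_ids:
--             adjacency[src].append(tgt)
--             in_degree[tgt] = in_degree.get(tgt, 0) + 1
--
--     queue: deque[Any] = deque(nid for nid, deg in in_degree.items() if deg == 0)
--     visited_count = 0
--     while queue:
--         current = queue.popleft()
--         visited_count += 1
--         for neighbor in adjacency[current]:
--             in_degree[neighbor] -= 1
--             if in_degree[neighbor] == 0:
--                 queue.append(neighbor)
--
--     if visited_count != len(node_ids):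
--         warnings.append("Flow graph contains a cycle.")
--
--     return warnings
-- ===== SOURCE B (Python) =====
-- def validate_flow_graph(flow_data):
--     """Validate a flow graph structure (alternative implementation).
--
--     Same warnings as the original, but cycle detection is done by
--     reachability closure (a cycle exists iff some edge (u, v) has u
--     reachable from v) instead of Kahn's topological sort.
--     """
--     warnings = []
--
--     nodes = flow_data.get("nodes", [])
--     edges = flow_data.get("edges", [])
--
--     if not nodes:
--         warnings.append("Flow must contain at least one node.")
--         return warnings
--
--     # -- trigger count --
--     n_triggers = sum(1 for n in nodes if n.get("type") == "trigger")
--     if n_triggers == 0: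
--         warnings.append("Flow must contain exactly one trigger node.")
--     elif n_triggers > 1:
--         warnings.append(
--             f"Flow contains {n_triggers} trigger nodes; "
--             "exactly one is required."
--         )
--
--     # -- cycle detection via reachability closure --
--     node_ids = {n.get("id") for n in nodes if n.get("id") is not None}
--     arcs = [
--         (e.get("source"), e.get("target"))
--         for e in edges
--         if e.get("source") in node_ids and e.get("target") in node_ids
--     ]
--
--     def reach_from(v):
--         # Everything reachable from v; len(node_ids) expansion rounds
--         # are enough to hit the fixpoint (the universe is node_ids).
--         seen = {v}
--         for _ in range(len(node_ids)):
--             seen = seen | {b for (a, b) in arcs if a in seen}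
--         return seen
--
--     if any(u in reach_from(v) for (u, v) in arcs):
--         warnings.append("Flow graph contains a cycle.")
--
--     return warnings
-- ===== Notes on version B (the rewrite author's own statement) =====
-- stated objective: alternative
-- what changed: Cycle detection is done by reachability closure (a cycle exists iff some kept edge (u,v) has u reachable from v, computed by iterated frontier expansion) instead of Kahn's in-degree/queue topological sort, and the trigger check counts matches instead of building a filtered list.
import Mathlib
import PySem

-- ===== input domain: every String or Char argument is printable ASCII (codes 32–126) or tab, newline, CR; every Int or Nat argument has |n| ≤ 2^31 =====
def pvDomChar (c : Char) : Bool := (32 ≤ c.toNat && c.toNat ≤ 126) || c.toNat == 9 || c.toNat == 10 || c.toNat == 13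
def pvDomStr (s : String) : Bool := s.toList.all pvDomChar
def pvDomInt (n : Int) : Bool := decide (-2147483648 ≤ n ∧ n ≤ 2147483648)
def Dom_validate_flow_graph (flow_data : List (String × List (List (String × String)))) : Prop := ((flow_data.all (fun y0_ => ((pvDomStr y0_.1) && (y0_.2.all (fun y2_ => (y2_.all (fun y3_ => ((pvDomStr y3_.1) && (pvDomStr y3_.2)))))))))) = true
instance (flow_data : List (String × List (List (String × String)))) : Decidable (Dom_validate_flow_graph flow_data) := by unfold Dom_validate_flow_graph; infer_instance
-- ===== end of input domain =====

-- B replaces Kahn's in-degree/queue topological sort by a reachability-closure cycle test;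
-- only the RETURN value is compared (neither version mutates its argument observably).

-- helper shared by both ports: the identical Python line
-- '{n.get("id") for n in nodes if n.get("id") is not None}'
def buildNodeIds (nodes : List (List (String × String))) : PySem.Set String :=
  nodes.foldl (fun s n =>
    match (PySem.Dict.mk n).get? "id" with
    | some i => PySem.Set.add s i
    | none => s) PySem.Set.empty

-- ===== PORT A =====

-- body of A's 'for edge in edges:' loop (state: adjacency, in_degree)
def edgeFoldF (node_ids : PySem.Set String)
    (st : PySem.Dict String (List String) × PySem.Dict String Int)
    (e : List (String × String)) :
    PySem.Dict String (List String) × PySem.Dict String Int :=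
  match (PySem.Dict.mk e).get? "source", (PySem.Dict.mk e).get? "target" with
  | some s, some t =>
    if s ∈ node_ids ∧ t ∈ node_ids then
      (st.1.insert s (st.1.getD s [] ++ [t]), st.2.insert t (st.2.getD t 0 + 1))
    else st
  | _, _ => st

-- 'in_degree[neighbor] -= 1; if in_degree[neighbor] == 0: queue.append(neighbor)' for one popped node
def kahnStep (nbrs : List String) (indeg : PySem.Dict String Int) (queue : List String) :
    PySem.Dict String Int × List String :=
  nbrs.foldl
    (fun (st : PySem.Dict String Int × List String) nb =>
      let d := st.1.getD nb 0 - 1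
      (st.1.insert nb d, if d = 0 then st.2 ++ [nb] else st.2))
    (indeg, queue)

-- termination measure for the while loop: Σ_keys max(in_degree, 0) + |queue|
def kahnPhi (indeg : PySem.Dict String Int) (queue : List String) : Nat :=
  (((PySem.List.dedup indeg.keys).map (fun k => (indeg.getD k 0).toNat)).sum) + queue.length

theorem sum_map_nodup_swap {α : Type} [DecidableEq α] (l : List α) (hl : l.Nodup) (x : α)
    (hx : x ∈ l) (f g : α → Nat) (hother : ∀ y ∈ l, y ≠ x → g y = f y) :
    (l.map g).sum + f x = (l.map f).sum + g x := by
  induction l with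
  | nil => cases hx
  | cons a t ih =>
    rcases List.mem_cons.mp hx with rfl | hxt
    · have ht : ∀ y ∈ t, g y = f y := by
        intro y hy
        exact hother y (List.mem_cons_of_mem _ hy) (fun h => (List.nodup_cons.mp hl).1 (h ▸ hy))
      simp only [List.map_cons, List.sum_cons, List.map_congr_left ht]
      omega
    · have ha : g a = f a := by
        refine hother a (List.mem_cons_self) (fun h => (List.nodup_cons.mp hl).1 (h ▸ hxt))
      have := ih (List.nodup_cons.mp hl).2 hxt (fun y hy hne => hother y (List.mem_cons_of_mem _ hy) hne)
      simp only [List.map_cons, List.sum_cons, ha]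
      omega

theorem kahnPhi_insert_le (indeg : PySem.Dict String Int) (queue : List String) (nb : String) :
    kahnPhi (indeg.insert nb (indeg.getD nb 0 - 1))
      (if indeg.getD nb 0 - 1 = 0 then queue ++ [nb] else queue) ≤ kahnPhi indeg queue := by
  by_cases hc : indeg.contains nb = true
  · have hkeys := PySem.Dict.keys_insert_of_contains indeg (indeg.getD nb 0 - 1) hc
    have hmem : nb ∈ PySem.List.dedup indeg.keys :=
      (PySem.List.mem_dedup _ _).mpr ((PySem.Dict.contains_iff_mem_keys indeg nb).mp hc)
    have hswap := sum_map_nodup_swap (PySem.List.dedup indeg.keys) (PySem.List.nodup_dedup _)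
      nb hmem (fun k => (indeg.getD k 0).toNat)
      (fun k => ((indeg.insert nb (indeg.getD nb 0 - 1)).getD k 0).toNat)
      (fun y _ hne => by dsimp only; rw [PySem.Dict.getD_insert_of_ne indeg _ _ hne])
    have hself : ((indeg.insert nb (indeg.getD nb 0 - 1)).getD nb 0) = indeg.getD nb 0 - 1 :=
      PySem.Dict.getD_insert_self ..
    dsimp only at hswap
    rw [hself] at hswap
    unfold kahnPhi
    rw [hkeys]
    split
    · next h0 =>
      simp only [List.length_append, List.length_cons, List.length_nil]
      omega
    · next h0 => omega
  · have hc' : indeg.contains nb = false := by simpa using hc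
    have hd0 : indeg.getD nb 0 = 0 := PySem.Dict.getD_of_not_contains indeg 0 hc'
    have hkeys := PySem.Dict.keys_insert_of_not_contains indeg (indeg.getD nb 0 - 1) hc'
    have hnbk : nb ∉ PySem.List.dedup indeg.keys := by
      rw [PySem.List.mem_dedup]
      intro hmem
      rw [(PySem.Dict.contains_iff_mem_keys indeg nb).mpr hmem] at hc'
      cases hc'
    unfold kahnPhi
    rw [hkeys]
    have hded : PySem.List.dedup (indeg.keys ++ [nb]) = PySem.List.dedup indeg.keys ++ [nb] := by
      rw [show PySem.List.dedup (indeg.keys ++ [nb]) = PySem.Set.ofList (indeg.keys ++ [nb]) from by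
        simp [pysem]]
      rw [PySem.Set.ofList_append_singleton]
      rw [show PySem.Set.ofList indeg.keys = PySem.List.dedup indeg.keys from by simp [pysem]]
      exact PySem.Set.add_of_not_mem hnbk
    rw [hded, List.map_append, List.sum_append]
    have hmapeq : List.map (fun k => ((indeg.insert nb (indeg.getD nb 0 - 1)).getD k 0).toNat)
        (PySem.List.dedup indeg.keys) = List.map (fun k => (indeg.getD k 0).toNat)
        (PySem.List.dedup indeg.keys) := by
      refine List.map_congr_left ?_
      intro y hy
      have hne : y ≠ nb := fun h => hnbk (h ▸ hy)
      rw [PySem.Dict.getD_insert_of_ne indeg _ _ hne]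
    rw [hmapeq]
    rw [if_neg (by rw [hd0]; omega)]
    simp only [List.map_cons, List.map_nil, List.sum_cons, List.sum_nil,
      PySem.Dict.getD_insert_self, hd0]
    omega

theorem kahnStep_phi (nbrs : List String) (indeg : PySem.Dict String Int) (queue : List String) :
    kahnPhi (kahnStep nbrs indeg queue).1 (kahnStep nbrs indeg queue).2 ≤ kahnPhi indeg queue := by
  induction nbrs generalizing indeg queue with
  | nil => simp [kahnStep]
  | cons nb t ih =>
    have h1 := kahnPhi_insert_le indeg queue nb
    have h2 := ih (indeg.insert nb (indeg.getD nb 0 - 1))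
      (if indeg.getD nb 0 - 1 = 0 then queue ++ [nb] else queue)
    simp only [kahnStep, List.foldl_cons] at *
    exact le_trans h2 h1

-- the 'while queue:' loop of A
def kahnLoop (adj : PySem.Dict String (List String)) (indeg : PySem.Dict String Int)
    (queue : List String) (visited : Nat) : Nat :=
  match queue with
  | [] => visited
  | c :: rest =>
    let st := kahnStep (adj.getD c []) indeg rest
    kahnLoop adj st.1 st.2 (visited + 1)
termination_by kahnPhi indeg queue
decreasing_by
  calc kahnPhi (kahnStep (adj.getD c []) indeg rest).1 (kahnStep (adj.getD c []) indeg rest).2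
      ≤ kahnPhi indeg rest := kahnStep_phi _ _ _
    _ < kahnPhi indeg (c :: rest) := by simp only [kahnPhi, List.length_cons]; omega

def validate_flow_graph (flow_data : List (String × List (List (String × String)))) : List String :=
  let nodes := (PySem.Dict.mk flow_data).getD "nodes" []
  let edges := (PySem.Dict.mk flow_data).getD "edges" []
  if nodes = [] then ["Flow must contain at least one node."]
  else
    let warnings : List String := []
    let trigger_nodes := nodes.filter (fun n => (PySem.Dict.mk n).get? "type" == some "trigger")
    let warnings :=
      if trigger_nodes.length = 0 then
        warnings ++ ["Flow must contain exactly one trigger node."]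
      else if trigger_nodes.length > 1 then
        warnings ++ ["Flow contains " ++ PySem.Int.toStr (trigger_nodes.length : Int) ++
          " trigger nodes; exactly one is required."]
      else warnings
    let node_ids := buildNodeIds nodes
    let indeg0 : PySem.Dict String Int :=
      node_ids.foldl (fun d nid => d.insert nid 0) PySem.Dict.empty
    let st := edges.foldl (edgeFoldF node_ids) (PySem.Dict.empty, indeg0)
    let queue := (st.2.items.filter (fun p => p.2 == 0)).map (·.1)
    let visited := kahnLoop st.1 st.2 queue 0
    if visited ≠ node_ids.length then warnings ++ ["Flow graph contains a cycle."] else warnings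

-- ===== PORT B =====

-- body of B's arcs comprehension: one edge, kept iff both endpoints are known ids
def arcF (node_ids : PySem.Set String) (e : List (String × String)) : Option (String × String) :=
  match (PySem.Dict.mk e).get? "source", (PySem.Dict.mk e).get? "target" with
  | some s, some t => if s ∈ node_ids ∧ t ∈ node_ids then some (s, t) else none
  | _, _ => none

-- 'seen | {b for (a, b) in arcs if a in seen}'
def reachStep (arcs : List (String × String)) (s : PySem.Set String) : PySem.Set String :=
  PySem.Set.union s ((arcs.filter (fun ab => PySem.Set.contains s ab.1)).map (·.2))

-- 'reach_from(v)': len(node_ids) expansion rounds starting from {v}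
def reachFrom (rounds : Nat) (arcs : List (String × String)) (v : String) : PySem.Set String :=
  (List.range rounds).foldl (fun s _ => reachStep arcs s) (PySem.Set.add PySem.Set.empty v)

def validate_flow_graph_alt (flow_data : List (String × List (List (String × String)))) : List String :=
  let nodes := (PySem.Dict.mk flow_data).getD "nodes" []
  let edges := (PySem.Dict.mk flow_data).getD "edges" []
  if nodes = [] then ["Flow must contain at least one node."]
  else
    let warnings : List String := []
    let n_triggers := nodes.countP (fun n => (PySem.Dict.mk n).get? "type" == some "trigger")
    let warnings :=
      if n_triggers = 0 then
        warnings ++ ["Flow must contain exactly one trigger node."]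
      else if n_triggers > 1 then
        warnings ++ ["Flow contains " ++ PySem.Int.toStr (n_triggers : Int) ++
          " trigger nodes; exactly one is required."]
      else warnings
    let node_ids := buildNodeIds nodes
    let arcs := edges.filterMap (arcF node_ids)
    if arcs.any (fun uv => PySem.Set.contains (reachFrom node_ids.length arcs uv.2) uv.1) then
      warnings ++ ["Flow graph contains a cycle."]
    else warnings

-- ===== PRECONDITION & SPEC =====
def Spec_validate_flow_graph (flow_data : List (String × List (List (String × String)))) (out : List String) : Prop := out = validate_flow_graph_alt flow_data
instance (flow_data : List (String × List (List (String × String)))) (out : List String) : Decidable (Spec_validate_flow_graph flow_data out) := by unfold Spec_validate_flow_graph; infer_instance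

-- ===== CLAIM (what is proved, stated in full; the proofs are below) =====
def Claim_equal_validate_flow_graph : Prop := ∀ (flow_data : List (String × List (List (String × String)))), Dom_validate_flow_graph flow_data → Spec_validate_flow_graph flow_data (validate_flow_graph flow_data)

-- ===== LEMMAS AND PROOFS =====

-- v is eventually removable by peeling: all its in-neighbours are removable
inductive PeelP (arcs : List (String × String)) : String → Prop
  | intro (v : String) (h : ∀ u, (u, v) ∈ arcs → PeelP arcs u) : PeelP arcs v

-- walks along arcs
inductive ReachP (arcs : List (String × String)) : String → String → Prop
  | refl (v : String) : ReachP arcs v v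
  | head {a b c : String} (h : (a, b) ∈ arcs) (r : ReachP arcs b c) : ReachP arcs a c

-- in-degree of v counting only arcs whose source is not yet popped (not in P)
def inCnt (arcs : List (String × String)) (P : List String) (v : String) : Nat :=
  (arcs.filter (fun p => p.2 == v && !(decide (p.1 ∈ P)))).length

-- ---------- generic reachability facts ----------

theorem ReachP_trans {arcs : List (String × String)} {a b : String}
    (h1 : ReachP arcs a b) : ∀ {c : String}, ReachP arcs b c → ReachP arcs a c := by
  induction h1 with
  | refl v => exact fun h => h
  | head h r ih => exact fun h2 => ReachP.head h (ih h2)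

theorem ReachP_snoc {arcs : List (String × String)} {a b c : String}
    (h : ReachP arcs a b) (he : (b, c) ∈ arcs) : ReachP arcs a c :=
  ReachP_trans h (ReachP.head he (ReachP.refl c))

theorem reach_snoc_inv {arcs : List (String × String)} {w u : String}
    (h : ReachP arcs w u) : w = u ∨ ∃ p, ReachP arcs w p ∧ (p, u) ∈ arcs := by
  induction h with
  | refl v => exact Or.inl rfl
  | head ha r ih =>
    rcases ih with rfl | ⟨p, hp, hpu⟩
    · exact Or.inr ⟨_, ReachP.refl _, ha⟩
    · exact Or.inr ⟨p, ReachP.head ha hp, hpu⟩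

theorem not_peel_of_stuck (arcs : List (String × String)) (S : String → Prop)
    (hS : ∀ w, S w → ∃ u, (u, w) ∈ arcs ∧ S u) : ∀ w, S w → ¬ PeelP arcs w := by
  have key : ∀ w, PeelP arcs w → S w → False := by
    intro w hp
    induction hp with
    | intro x hpred ih =>
      intro hSx
      obtain ⟨u, hu, hSu⟩ := hS x hSx
      exact ih u hu hSu
  exact fun w hSw hp => key w hp hSw

theorem peel_no_cycle {arcs : List (String × String)} {u : String}
    (hp : PeelP arcs u) : ¬ ∃ w, (u, w) ∈ arcs ∧ ReachP arcs w u := by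
  induction hp with
  | intro x hpred ih =>
    rintro ⟨w, hxw, hwx⟩
    rcases reach_snoc_inv hwx with rfl | ⟨p, hwp, hpx⟩
    · exact ih w hxw ⟨w, hxw, ReachP.refl w⟩
    · exact ih p hpx ⟨x, hpx, ReachP.head hxw hwp⟩

theorem exists_cycle_of_not_peel (arcs : List (String × String)) (ids : List String)
    (hids : ids.Nodup) (harcs : ∀ p ∈ arcs, p.1 ∈ ids ∧ p.2 ∈ ids)
    (v : String) (hv : v ∈ ids) (hnp : ¬ PeelP arcs v) :
    ∃ p ∈ arcs, ReachP arcs p.2 p.1 := by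
  have step : ∀ x, ¬ PeelP arcs x → ∃ y, (y, x) ∈ arcs ∧ ¬ PeelP arcs y := by
    intro x hx
    by_contra h
    refine hx (PeelP.intro x fun u hu => ?_)
    by_contra hnp2
    exact h ⟨u, hu, hnp2⟩
  let g : Nat → {x : String // ¬ PeelP arcs x} := fun n =>
    Nat.rec ⟨v, hnp⟩ (fun _ p => ⟨(step p.1 p.2).choose, (step p.1 p.2).choose_spec.2⟩) n
  have hgstep : ∀ n, ((g (n+1)).1, (g n).1) ∈ arcs := fun n =>
    (step (g n).1 (g n).2).choose_spec.1
  have hgids : ∀ n, (g n).1 ∈ ids := by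
    intro n
    cases n with
    | zero => exact hv
    | succ m => exact (harcs _ (hgstep m)).1
  have hchain : ∀ a b : Nat, a ≤ b → ReachP arcs (g b).1 (g a).1 := by
    intro a b hab
    induction b with
    | zero =>
      cases Nat.le_zero.mp hab
      exact ReachP.refl _
    | succ m ih =>
      rcases Nat.lt_succ_iff_lt_or_eq.mp (Nat.lt_succ_of_le hab) with h | rfl
      · exact ReachP.head (hgstep m) (ih (by omega))
      · exact ReachP.refl _
  have hmaps : ∀ k ∈ Finset.range (ids.length + 1), (g k).1 ∈ ids.toFinset := by
    intro k _
    exact List.mem_toFinset.mpr (hgids k)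
  have hcard : ids.toFinset.card < (Finset.range (ids.length + 1)).card := by
    rw [Finset.card_range, List.toFinset_card_of_nodup hids]
    omega
  obtain ⟨i, hi, j, hj, hne, heq⟩ :=
    Finset.exists_ne_map_eq_of_card_lt_of_maps_to hcard hmaps
  rcases Nat.lt_or_ge i j with hij | hge
  · refine ⟨((g j).1, (g (j-1)).1), ?_, ?_⟩
    · have := hgstep (j-1)
      rwa [Nat.sub_add_cancel (by omega)] at this
    · have h := hchain i (j-1) (by omega)
      rw [heq] at h
      exact h
  · have hij : j < i := by omega
    refine ⟨((g i).1, (g (i-1)).1), ?_, ?_⟩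
    · have := hgstep (i-1)
      rwa [Nat.sub_add_cancel (by omega)] at this
    · have h := hchain j (i-1) (by omega)
      rw [← heq] at h
      exact h

-- ---------- node_ids ----------

theorem nodup_buildNodeIds (nodes : List (List (String × String))) :
    (buildNodeIds nodes).Nodup := by
  suffices h : ∀ (s : PySem.Set String), s.Nodup →
      (nodes.foldl (fun s n =>
        match (PySem.Dict.mk n).get? "id" with
        | some i => PySem.Set.add s i
        | none => s) s).Nodup by
    exact h PySem.Set.empty List.nodup_nil
  induction nodes with
  | nil => exact fun s hs => hs
  | cons n tl ih =>
    intro s hs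
    simp only [List.foldl_cons]
    cases (PySem.Dict.mk n).get? "id" with
    | none => exact ih s hs
    | some i => exact ih _ (PySem.Set.nodup_add s i hs)

-- ---------- the edge loop of A vs the arcs comprehension of B ----------

theorem arcF_some (ids : PySem.Set String) (e : List (String × String))
    {p : String × String} (h : arcF ids e = some p) : p.1 ∈ ids ∧ p.2 ∈ ids := by
  unfold arcF at h
  revert h
  cases (PySem.Dict.mk e).get? "source" with
  | none => intro h; cases h
  | some s =>
    cases (PySem.Dict.mk e).get? "target" with
    | none => intro h; cases h
    | some t =>
      intro h
      dsimp only at h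
      by_cases hst : s ∈ ids ∧ t ∈ ids
      · rw [if_pos hst] at h
        cases h
        exact hst
      · rw [if_neg hst] at h
        cases h

theorem arcs_mem (ids : PySem.Set String) (edges : List (List (String × String))) :
    ∀ p ∈ edges.filterMap (arcF ids), p.1 ∈ ids ∧ p.2 ∈ ids := by
  intro p hp
  obtain ⟨e, _, he⟩ := List.mem_filterMap.mp hp
  exact arcF_some ids e he

theorem edgeFoldF_eq (ids : PySem.Set String)
    (st : PySem.Dict String (List String) × PySem.Dict String Int)
    (e : List (String × String)) :
    edgeFoldF ids st e = (match arcF ids e with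
      | some p => (st.1.insert p.1 (st.1.getD p.1 [] ++ [p.2]), st.2.insert p.2 (st.2.getD p.2 0 + 1))
      | none => st) := by
  unfold edgeFoldF arcF
  cases (PySem.Dict.mk e).get? "source" with
  | none => rfl
  | some s =>
    cases (PySem.Dict.mk e).get? "target" with
    | none => rfl
    | some t =>
      dsimp only
      by_cases hst : s ∈ ids ∧ t ∈ ids
      · simp [hst]
      · simp [hst]

theorem edgeFold_adj (ids : PySem.Set String) (edges : List (List (String × String))) :
    ∀ (adj0 : PySem.Dict String (List String)) (ind0 : PySem.Dict String Int) (u : String),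
    ((edges.foldl (edgeFoldF ids) (adj0, ind0)).1).getD u []
      = adj0.getD u [] ++ ((edges.filterMap (arcF ids)).filter (fun p => p.1 == u)).map (·.2) := by
  induction edges with
  | nil => intro adj0 ind0 u; simp
  | cons e tl ih =>
    intro adj0 ind0 u
    rw [List.foldl_cons, List.filterMap_cons, edgeFoldF_eq]
    cases harc : arcF ids e with
    | none =>
      exact ih adj0 ind0 u
    | some p =>
      rw [ih]
      rw [List.filter_cons]
      by_cases hu : p.1 = u
      · have hbeq : (p.1 == u) = true := beq_iff_eq.mpr hu
        rw [hbeq]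
        simp only [if_true, List.map_cons]
        subst hu
        rw [PySem.Dict.getD_insert_self]
        rw [List.append_assoc]
        rfl
      · have hbeq : (p.1 == u) = false := beq_eq_false_iff_ne.mpr hu
        rw [hbeq]
        simp only [Bool.false_eq_true, if_false]
        rw [PySem.Dict.getD_insert_of_ne _ _ _ (fun h => hu h.symm)]

theorem edgeFold_ind (ids : PySem.Set String) (edges : List (List (String × String))) :
    ∀ (adj0 : PySem.Dict String (List String)) (ind0 : PySem.Dict String Int) (v : String),
    ((edges.foldl (edgeFoldF ids) (adj0, ind0)).2).getD v 0
      = ind0.getD v 0 + (((edges.filterMap (arcF ids)).filter (fun p => p.2 == v)).length : Int) := by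
  induction edges with
  | nil => intro adj0 ind0 v; simp
  | cons e tl ih =>
    intro adj0 ind0 v
    rw [List.foldl_cons, List.filterMap_cons, edgeFoldF_eq]
    cases harc : arcF ids e with
    | none =>
      exact ih adj0 ind0 v
    | some p =>
      rw [ih]
      rw [List.filter_cons]
      by_cases hv : p.2 = v
      · have hbeq : (p.2 == v) = true := beq_iff_eq.mpr hv
        rw [hbeq]
        simp only [if_true, List.length_cons]
        subst hv
        rw [PySem.Dict.getD_insert_self]
        push_cast
        ring
      · have hbeq : (p.2 == v) = false := beq_eq_false_iff_ne.mpr hv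
        rw [hbeq]
        simp only [Bool.false_eq_true, if_false]
        rw [PySem.Dict.getD_insert_of_ne _ _ _ (fun h => hv h.symm)]

theorem edgeFold_keys (ids : PySem.Set String) (edges : List (List (String × String))) :
    ∀ (adj0 : PySem.Dict String (List String)) (ind0 : PySem.Dict String Int),
    (∀ t, t ∈ ids → t ∈ ind0.keys) →
    ((edges.foldl (edgeFoldF ids) (adj0, ind0)).2).keys = ind0.keys := by
  induction edges with
  | nil => intro adj0 ind0 _; rfl
  | cons e tl ih =>
    intro adj0 ind0 hkeys
    rw [List.foldl_cons, edgeFoldF_eq]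
    cases harc : arcF ids e with
    | none =>
      exact ih adj0 ind0 hkeys
    | some p =>
      have hmem : p.2 ∈ ind0.keys := hkeys p.2 (arcF_some ids e harc).2
      have hcont : ind0.contains p.2 = true := (PySem.Dict.contains_iff_mem_keys ind0 p.2).mpr hmem
      have hkeq := PySem.Dict.keys_insert_of_contains ind0 (ind0.getD p.2 0 + 1) hcont
      rw [ih _ _ (fun t ht => by rw [hkeq]; exact hkeys t ht), hkeq]

theorem ind0_getD (ids : PySem.Set String) (v : String) :
    (ids.foldl (fun d nid => d.insert nid 0) (PySem.Dict.empty : PySem.Dict String Int)).getD v 0 = 0 := by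
  suffices h : ∀ (d : PySem.Dict String Int), d.getD v 0 = 0 →
      (ids.foldl (fun d nid => d.insert nid 0) d).getD v 0 = 0 by
    exact h PySem.Dict.empty (by simp [pysem])
  induction ids with
  | nil => exact fun d hd => hd
  | cons a tl ih =>
    intro d hd
    simp only [List.foldl_cons]
    refine ih _ ?_
    rw [PySem.Dict.getD_insert]
    split <;> simp [hd]

theorem ind0_keys (ids : PySem.Set String) (hids : ids.Nodup) :
    (ids.foldl (fun d nid => d.insert nid 0) (PySem.Dict.empty : PySem.Dict String Int)).keys = ids := by
  have h := PySem.Dict.keys_foldl_insert (ν := Int) ids (fun _ _ => 0) PySem.Dict.empty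
  rw [h, PySem.Dict.keys_empty, PySem.Set.update_nil_left,
    PySem.Set.ofList_eq_self_of_nodup ids hids]

-- ---------- kahnStep characterisation ----------

theorem kahnStep_getD (nbrs : List String) (indeg : PySem.Dict String Int)
    (queue : List String) (v : String) :
    (kahnStep nbrs indeg queue).1.getD v 0 = indeg.getD v 0 - nbrs.count v := by
  induction nbrs generalizing indeg queue with
  | nil => simp [kahnStep]
  | cons nb t ih =>
    simp only [kahnStep, List.foldl_cons] at *
    rw [ih, PySem.Dict.getD_insert]
    by_cases hv : v = nb
    · subst hv
      rw [if_pos rfl, List.count_cons_self]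
      push_cast
      ring
    · rw [if_neg hv, List.count_cons_of_ne (Ne.symm hv)]

theorem kahnStep_mem_queue (nbrs : List String) (indeg : PySem.Dict String Int)
    (queue : List String) (v : String) :
    v ∈ (kahnStep nbrs indeg queue).2 ↔
      v ∈ queue ∨ (1 ≤ indeg.getD v 0 ∧ indeg.getD v 0 ≤ (nbrs.count v : Int)) := by
  induction nbrs generalizing indeg queue with
  | nil =>
    simp only [kahnStep, List.foldl_nil, List.count_nil, Nat.cast_zero]
    constructor
    · exact Or.inl
    · rintro (h | ⟨h1, h2⟩)
      · exact h
      · omega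
  | cons nb t ih =>
    simp only [kahnStep, List.foldl_cons] at *
    rw [ih]
    by_cases hv : v = nb
    · subst hv
      rw [PySem.Dict.getD_insert_self]
      have hcnt : ((v :: t).count v : Int) = (t.count v : Int) + 1 := by
        rw [List.count_cons_self]
        push_cast
        ring
      rw [hcnt]
      by_cases hd : indeg.getD v 0 - 1 = 0
      · rw [if_pos hd]
        have hl : v ∈ queue ++ [v] := by simp
        constructor
        · intro _
          exact Or.inr ⟨by omega, by omega⟩
        · intro _
          exact Or.inl hl
      · rw [if_neg hd]
        constructor
        · rintro (h | ⟨h1, h2⟩)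
          · exact Or.inl h
          · exact Or.inr ⟨by omega, by omega⟩
        · rintro (h | ⟨h1, h2⟩)
          · exact Or.inl h
          · exact Or.inr ⟨by omega, by omega⟩
    · rw [PySem.Dict.getD_insert_of_ne _ _ _ hv, List.count_cons_of_ne (Ne.symm hv)]
      by_cases hd : indeg.getD nb 0 - 1 = 0
      · rw [if_pos hd]
        constructor
        · rintro (h | h)
          · rcases List.mem_append.mp h with h' | h'
            · exact Or.inl h'
            · simp only [List.mem_singleton] at h'
              exact absurd h' hv
          · exact Or.inr h
        · rintro (h | h)
          · exact Or.inl (List.mem_append.mpr (Or.inl h))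
          · exact Or.inr h
      · rw [if_neg hd]

theorem kahnStep_nodup (nbrs : List String) (indeg : PySem.Dict String Int)
    (queue : List String) (hq : queue.Nodup)
    (h0 : ∀ v ∈ queue, indeg.getD v 0 ≤ 0) :
    (kahnStep nbrs indeg queue).2.Nodup := by
  induction nbrs generalizing indeg queue with
  | nil => simpa [kahnStep]
  | cons nb t ih =>
    simp only [kahnStep, List.foldl_cons] at *
    by_cases hd : indeg.getD nb 0 - 1 = 0
    · rw [if_pos hd]
      have hnb : nb ∉ queue := by
        intro hmem
        have := h0 nb hmem
        omega
      refine ih _ _ ?_ ?_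
      · exact hq.append (List.nodup_singleton nb)
          (fun a ha hb => by
            simp only [List.mem_singleton] at hb
            exact hnb (hb ▸ ha))
      · intro v hv
        rw [PySem.Dict.getD_insert]
        rcases List.mem_append.mp hv with h | h
        · split
          · next heq =>
            have hh := h0 v h
            rw [heq] at hh
            omega
          · exact h0 v h
        · simp only [List.mem_singleton] at h
          subst h
          rw [if_pos rfl]
          omega
    · rw [if_neg hd]
      refine ih _ _ hq ?_
      intro v hv
      rw [PySem.Dict.getD_insert]
      split
      · next heq =>
        have hh := h0 v hv
        rw [heq] at hh
        omega
      · exact h0 v hv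

-- ---------- inCnt bookkeeping ----------

theorem inCnt_nil_pop (arcs : List (String × String)) (v : String) :
    inCnt arcs [] v = (arcs.filter (fun p => p.2 == v)).length := by
  unfold inCnt
  simp

theorem length_filter_add_length_filter {a : Type} (l : List a) (f g h : a → Bool)
    (hpt : ∀ x ∈ l, (f x).toNat + (g x).toNat = (h x).toNat) :
    (l.filter f).length + (l.filter g).length = (l.filter h).length := by
  induction l with
  | nil => simp
  | cons x tl ih =>
    have hx := hpt x List.mem_cons_self
    have htl := ih (fun y hy => hpt y (List.mem_cons_of_mem x hy))
    simp only [List.filter_cons]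
    cases hfx : f x <;> cases hgx : g x <;> cases hhx : h x <;>
      rw [hfx, hgx, hhx] at hx <;> simp_all <;> omega

theorem inCnt_append (arcs : List (String × String)) (P : List String) (c v : String)
    (hc : c ∉ P) :
    inCnt arcs (P ++ [c]) v
      + (arcs.filter (fun p => p.1 == c && p.2 == v)).length = inCnt arcs P v := by
  unfold inCnt
  refine length_filter_add_length_filter arcs _ _ _ ?_
  intro p _
  by_cases h1 : p.1 = c
  · have hpm : p.1 ∉ P := fun h => hc (h1 ▸ h)
    have hcd : decide (c ∈ P) = false := decide_eq_false hc
    by_cases h2 : p.2 = v <;> simp [h2, h1, hcd]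
  · by_cases h2 : p.2 = v <;> by_cases hpm : p.1 ∈ P <;> simp [h2, h1, hpm]

theorem inCnt_mono (arcs : List (String × String)) (P : List String) (c v : String)
    (hc : c ∉ P) : inCnt arcs (P ++ [c]) v ≤ inCnt arcs P v := by
  have := inCnt_append arcs P c v hc
  omega

theorem cntFrom_le_inCnt (arcs : List (String × String)) (P : List String) (c v : String)
    (hc : c ∉ P) :
    (arcs.filter (fun p => p.1 == c && p.2 == v)).length ≤ inCnt arcs P v := by
  have := inCnt_append arcs P c v hc
  omega

theorem inCnt_pos_arc (arcs : List (String × String)) (P : List String) (v : String)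
    (h : inCnt arcs P v ≠ 0) : ∃ p ∈ arcs, p.2 = v ∧ p.1 ∉ P := by
  unfold inCnt at h
  have hne : arcs.filter (fun p => p.2 == v && !(decide (p.1 ∈ P))) ≠ [] := by
    intro hnil
    rw [hnil] at h
    exact h rfl
  obtain ⟨p, hp⟩ := List.exists_mem_of_ne_nil _ hne
  have hmem := List.mem_filter.mp hp
  have h2 := hmem.2
  simp only [Bool.and_eq_true, beq_iff_eq, Bool.not_eq_true', decide_eq_false_iff_not] at h2
  exact ⟨p, hmem.1, h2.1, h2.2⟩

theorem inCnt_zero_preds (arcs : List (String × String)) (P : List String) (v : String)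
    (h : inCnt arcs P v = 0) : ∀ u, (u, v) ∈ arcs → u ∈ P := by
  intro u hu
  by_contra hnot
  unfold inCnt at h
  rw [List.length_eq_zero_iff] at h
  have hmem : (u, v) ∈ arcs.filter (fun p => p.2 == v && !(decide (p.1 ∈ P))) := by
    refine List.mem_filter.mpr ⟨hu, ?_⟩
    simp [hnot]
  rw [h] at hmem
  cases hmem

-- nbrs.count v equals the number of arcs c → v
theorem count_adj (arcs : List (String × String)) (c v : String) :
    ((arcs.filter (fun p => p.1 == c)).map (·.2)).count v
      = (arcs.filter (fun p => p.1 == c && p.2 == v)).length := by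
  rw [List.count, List.countP_map, List.countP_filter, ← List.countP_eq_length_filter]
  congr 1
  funext p
  simp [Bool.and_comm]

-- ---------- the main Kahn loop invariant ----------

theorem kahnLoop_spec
    (arcs : List (String × String)) (ids : List String) (hids : ids.Nodup)
    (harcs : ∀ p ∈ arcs, p.1 ∈ ids ∧ p.2 ∈ ids)
    (adj : PySem.Dict String (List String))
    (hadj : ∀ u, adj.getD u [] = (arcs.filter (fun p => p.1 == u)).map (·.2)) :
    ∀ (indeg : PySem.Dict String Int) (queue : List String) (visited : Nat) (P : List String),
    (∀ v ∈ ids, indeg.getD v 0 = (inCnt arcs P v : Int)) →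
    (∀ v, v ∉ ids → indeg.getD v 0 ≤ 0) →
    queue.Nodup → (∀ q ∈ queue, q ∈ ids ∧ q ∉ P) →
    (∀ v ∈ ids, v ∉ P → (inCnt arcs P v = 0 ↔ v ∈ queue)) →
    P.Nodup → (∀ p ∈ P, p ∈ ids ∧ PeelP arcs p) →
    (∀ p ∈ P, inCnt arcs P p = 0) →
    visited = P.length →
    ((kahnLoop adj indeg queue visited = ids.length) ↔ (∀ v ∈ ids, PeelP arcs v)) := by
  have main : ∀ (n : Nat) (indeg : PySem.Dict String Int) (queue : List String)
      (visited : Nat) (P : List String), kahnPhi indeg queue = n →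
      (∀ v ∈ ids, indeg.getD v 0 = (inCnt arcs P v : Int)) →
      (∀ v, v ∉ ids → indeg.getD v 0 ≤ 0) →
      queue.Nodup → (∀ q ∈ queue, q ∈ ids ∧ q ∉ P) →
      (∀ v ∈ ids, v ∉ P → (inCnt arcs P v = 0 ↔ v ∈ queue)) →
      P.Nodup → (∀ p ∈ P, p ∈ ids ∧ PeelP arcs p) →
      (∀ p ∈ P, inCnt arcs P p = 0) →
      visited = P.length →
      ((kahnLoop adj indeg queue visited = ids.length) ↔ (∀ v ∈ ids, PeelP arcs v)) := by
    intro n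
    induction n using Nat.strong_induction_on with
    | _ n IH =>
      intro indeg queue visited P hphi h2 h2' hqnd hqm h4 hPnd hPmem h7 hvis
      cases queue with
      | nil =>
        have hk : kahnLoop adj indeg [] visited = visited := by rw [kahnLoop]
        rw [hk]
        have hPsub : P ⊆ ids := fun p hp => (hPmem p hp).1
        have hsp : P.Subperm ids := hPnd.subperm hPsub
        constructor
        · intro heq
          have hperm : P.Perm ids := hsp.perm_of_length_le (by omega)
          intro v hv
          exact (hPmem v (hperm.mem_iff.mpr hv)).2
        · intro hall
          by_contra hne
          have hlt : P.length < ids.length := by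
            have := hsp.length_le
            omega
          have hex : ∃ v ∈ ids, v ∉ P := by
            by_contra h
            have hsub2 : ids ⊆ P := by
              intro x hx
              by_contra hxP
              exact h ⟨x, hx, hxP⟩
            have := (hids.subperm hsub2).length_le
            omega
          obtain ⟨v, hv, hvP⟩ := hex
          have hstuck : ∀ w, (w ∈ ids ∧ w ∉ P) → ∃ u, (u, w) ∈ arcs ∧ (u ∈ ids ∧ u ∉ P) := by
            rintro w ⟨hw, hwP⟩
            have hnz : inCnt arcs P w ≠ 0 := by
              intro h
              have := (h4 w hw hwP).mp h
              cases this
            obtain ⟨p, hp, hp2, hp1⟩ := inCnt_pos_arc arcs P w hnz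
            refine ⟨p.1, ?_, (harcs p hp).1, hp1⟩
            rw [← hp2]
            exact hp
          exact not_peel_of_stuck arcs _ hstuck v ⟨hv, hvP⟩ (hall v hv)
      | cons c rest =>
        obtain ⟨hcid, hcP⟩ := hqm c List.mem_cons_self
        have hc0 : inCnt arcs P c = 0 := (h4 c hcid hcP).mpr List.mem_cons_self
        have hnbrs : adj.getD c [] = (arcs.filter (fun p => p.1 == c)).map (·.2) := hadj c
        have hcnt : ∀ v, (adj.getD c []).count v
            = (arcs.filter (fun p => p.1 == c && p.2 == v)).length := by
          intro v
          rw [hnbrs]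
          exact count_adj arcs c v
        have hinc : ∀ v, inCnt arcs (P ++ [c]) v
            + (arcs.filter (fun p => p.1 == c && p.2 == v)).length = inCnt arcs P v :=
          fun v => inCnt_append arcs P c v hcP
        have hgd : ∀ v, (kahnStep (adj.getD c []) indeg rest).1.getD v 0
            = indeg.getD v 0 - (adj.getD c []).count v := fun v => kahnStep_getD _ _ _ v
        have hmemq : ∀ v, v ∈ (kahnStep (adj.getD c []) indeg rest).2 ↔
            v ∈ rest ∨ (1 ≤ indeg.getD v 0 ∧
              indeg.getD v 0 ≤ ((adj.getD c []).count v : Int)) :=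
          fun v => kahnStep_mem_queue _ _ _ v
        have hrest0 : ∀ v ∈ rest, indeg.getD v 0 ≤ 0 := by
          intro v hv
          obtain ⟨hvid, hvP⟩ := hqm v (List.mem_cons_of_mem c hv)
          have : inCnt arcs P v = 0 := (h4 v hvid hvP).mpr (List.mem_cons_of_mem c hv)
          rw [h2 v hvid, this]
          simp
        have hcontra_c : ∀ v, v ∈ P ∨ v = c → ¬ (1 ≤ indeg.getD v 0 ∧
            indeg.getD v 0 ≤ ((adj.getD c []).count v : Int)) := by
          rintro v hv ⟨hge, hle⟩
          have hvid : v ∈ ids := by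
            rcases hv with h | rfl
            · exact (hPmem v h).1
            · exact hcid
          rw [h2 v hvid] at hge hle
          have hcnt' := hcnt v
          have hinc' := hinc v
          rcases hv with h | rfl
          · have := h7 v h
            omega
          · omega
        have hk : kahnLoop adj indeg (c :: rest) visited
            = kahnLoop adj (kahnStep (adj.getD c []) indeg rest).1
                (kahnStep (adj.getD c []) indeg rest).2 (visited + 1) := by
          rw [kahnLoop]
        rw [hk]
        have hphi' : kahnPhi (kahnStep (adj.getD c []) indeg rest).1
            (kahnStep (adj.getD c []) indeg rest).2 < n := by
          have ha := kahnStep_phi (adj.getD c []) indeg rest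
          simp only [kahnPhi, List.length_cons] at ha hphi ⊢
          omega
        refine IH _ hphi' _ _ _ (P ++ [c]) rfl ?_ ?_ ?_ ?_ ?_ ?_ ?_ ?_ ?_
        · -- in-degree invariant
          intro v hv
          rw [hgd v, h2 v hv]
          have h1 := hinc v
          have h2c := hcnt v
          omega
        · -- non-ids entries stay nonpositive
          intro v hv
          rw [hgd v]
          have := h2' v hv
          omega
        · -- new queue nodup
          exact kahnStep_nodup _ _ _ ((List.nodup_cons.mp hqnd).2) hrest0
        · -- new queue membership side conditions
          intro q hq
          rcases (hmemq q).mp hq with h | ⟨hge, hle⟩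
          · obtain ⟨hqid, hqP⟩ := hqm q (List.mem_cons_of_mem c h)
            refine ⟨hqid, ?_⟩
            rw [List.mem_append, List.mem_singleton]
            rintro (h' | rfl)
            · exact hqP h'
            · exact (List.nodup_cons.mp hqnd).1 h
          · have hqid : q ∈ ids := by
              by_contra hnot
              have := h2' q hnot
              omega
            refine ⟨hqid, ?_⟩
            rw [List.mem_append, List.mem_singleton]
            rintro (h' | rfl)
            · exact hcontra_c q (Or.inl h') ⟨hge, hle⟩
            · exact hcontra_c q (Or.inr rfl) ⟨hge, hle⟩
        · -- queue characterises zero in-degree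
          intro v hv hvP'
          rw [List.mem_append, List.mem_singleton] at hvP'
          have hvP : v ∉ P := fun h => hvP' (Or.inl h)
          have hvc : v ≠ c := fun h => hvP' (Or.inr h)
          have h4v := h4 v hv hvP
          have hinc' := hinc v
          have hcnt' := hcnt v
          have hle := cntFrom_le_inCnt arcs P c v hcP
          rw [hmemq v, h2 v hv]
          by_cases hr : v ∈ rest
          · have hz : inCnt arcs P v = 0 := h4v.mpr (List.mem_cons_of_mem c hr)
            constructor
            · intro _
              exact Or.inl hr
            · intro _
              omega
          · have hnz : inCnt arcs P v ≠ 0 := by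
              intro h
              rcases List.mem_cons.mp (h4v.mp h) with h' | h'
              · exact hvc h'
              · exact hr h'
            constructor
            · intro h0
              exact Or.inr ⟨by omega, by omega⟩
            · rintro (h | ⟨hge, hle2⟩)
              · exact absurd h hr
              · omega
        · -- P' nodup
          refine List.Nodup.append hPnd (List.nodup_singleton c) ?_
          simp only [List.disjoint_singleton]
          exact hcP
        · -- P' members are peelable
          intro p hp
          rw [List.mem_append, List.mem_singleton] at hp
          rcases hp with h | rfl
          · exact hPmem p h
          · refine ⟨hcid, PeelP.intro p ?_⟩
            intro u hu
            exact (hPmem u (inCnt_zero_preds arcs P p hc0 u hu)).2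
        · -- popped nodes keep zero in-degree
          intro p hp
          rw [List.mem_append, List.mem_singleton] at hp
          have hle' : inCnt arcs (P ++ [c]) p ≤ inCnt arcs P p := inCnt_mono arcs P c p hcP
          rcases hp with h | rfl
          · have := h7 p h
            omega
          · omega
        · -- visited count
          rw [hvis, List.length_append, List.length_singleton]
  intro indeg queue visited P
  exact main (kahnPhi indeg queue) indeg queue visited P rfl

-- ---------- B-side: reachFrom characterisation ----------

theorem reachFrom_succ (n : Nat) (arcs : List (String × String)) (v : String) :
    reachFrom (n+1) arcs v = reachStep arcs (reachFrom n arcs v) := by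
  unfold reachFrom
  rw [List.range_succ, List.foldl_append]
  rfl

theorem reachFrom_zero (arcs : List (String × String)) (v : String) :
    reachFrom 0 arcs v = [v] := rfl

theorem mem_reachStep (arcs : List (String × String)) (s : PySem.Set String) (x : String) :
    x ∈ reachStep arcs s ↔
      x ∈ s ∨ ∃ p ∈ arcs, p.2 = x ∧ p.1 ∈ s := by
  unfold reachStep
  rw [PySem.Set.mem_union]
  constructor
  · rintro (h | h)
    · exact Or.inl h
    · obtain ⟨p, hp, rfl⟩ := List.mem_map.mp h
      have hf := List.mem_filter.mp hp
      exact Or.inr ⟨p, hf.1, rfl, (PySem.Set.contains_iff _ _).mp hf.2⟩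
  · rintro (h | ⟨p, hp, rfl, hmem⟩)
    · exact Or.inl h
    · exact Or.inr (List.mem_map.mpr ⟨p,
        List.mem_filter.mpr ⟨hp, (PySem.Set.contains_iff _ _).mpr hmem⟩, rfl⟩)

theorem reach_sound (arcs : List (String × String)) (v : String) :
    ∀ n, ∀ x ∈ reachFrom n arcs v, ReachP arcs v x := by
  intro n
  induction n with
  | zero =>
    intro x hx
    rw [reachFrom_zero] at hx
    simp only [List.mem_singleton] at hx
    subst hx
    exact ReachP.refl _
  | succ m ih =>
    intro x hx
    rw [reachFrom_succ] at hx
    rcases (mem_reachStep _ _ _).mp hx with h | ⟨p, hp, rfl, hmem⟩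
    · exact ih x h
    · exact ReachP_snoc (ih p.1 hmem) (by simpa using hp)

theorem reachStep_append (arcs : List (String × String)) (s : PySem.Set String) :
    ∃ t, reachStep arcs s = s ++ t := by
  unfold reachStep PySem.Set.union
  rw [PySem.Set.update_eq_append_filter]
  exact ⟨_, rfl⟩

theorem reachFrom_nodup (arcs : List (String × String)) (v : String) :
    ∀ n, (reachFrom n arcs v).Nodup := by
  intro n
  induction n with
  | zero => simp [reachFrom_zero]
  | succ m ih =>
    rw [reachFrom_succ]
    exact PySem.Set.nodup_union _ _ ih

theorem reachFrom_subset_ids (arcs : List (String × String)) (ids : PySem.Set String)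
    (harcs : ∀ p ∈ arcs, p.1 ∈ ids ∧ p.2 ∈ ids) (v : String) (hv : v ∈ ids) :
    ∀ n, ∀ x ∈ reachFrom n arcs v, x ∈ ids := by
  intro n
  induction n with
  | zero =>
    intro x hx
    rw [reachFrom_zero] at hx
    simp only [List.mem_singleton] at hx
    subst hx
    exact hv
  | succ m ih =>
    intro x hx
    rw [reachFrom_succ] at hx
    rcases (mem_reachStep _ _ _).mp hx with h | ⟨p, hp, rfl, _⟩
    · exact ih x h
    · exact (harcs p hp).2

theorem reachFrom_le_subset (arcs : List (String × String)) (v : String) :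
    ∀ a b : Nat, a ≤ b → ∀ x ∈ reachFrom a arcs v, x ∈ reachFrom b arcs v := by
  intro a b hab
  induction b with
  | zero =>
    cases Nat.le_zero.mp hab
    exact fun x hx => hx
  | succ m ih =>
    rcases Nat.lt_succ_iff_lt_or_eq.mp (Nat.lt_succ_of_le hab) with h | rfl
    · intro x hx
      rw [reachFrom_succ]
      obtain ⟨t, ht⟩ := reachStep_append arcs (reachFrom m arcs v)
      rw [ht, List.mem_append]
      exact Or.inl (ih (by omega) x hx)
    · exact fun x hx => hx

theorem reach_complete (arcs : List (String × String)) (ids : List String)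
    (_hids : ids.Nodup) (harcs : ∀ p ∈ arcs, p.1 ∈ ids ∧ p.2 ∈ ids)
    (v : String) (hv : v ∈ ids) {u : String} (hr : ReachP arcs v u) :
    u ∈ reachFrom ids.length arcs v := by
  have hlen : ∀ k, (reachFrom k arcs v).length ≤ ids.length := by
    intro k
    have hsub : reachFrom k arcs v ⊆ ids :=
      fun x hx => reachFrom_subset_ids arcs ids harcs v hv k x hx
    exact ((reachFrom_nodup arcs v k).subperm hsub).length_le
  have hgrow : ∀ k, reachFrom (k+1) arcs v ≠ reachFrom k arcs v →
      (reachFrom k arcs v).length < (reachFrom (k+1) arcs v).length := by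
    intro k hne
    obtain ⟨t, ht⟩ := reachStep_append arcs (reachFrom k arcs v)
    rw [reachFrom_succ] at hne ⊢
    rw [ht] at hne ⊢
    cases t with
    | nil => simp at hne
    | cons a tt => simp
  have hstable : ∃ k, k ≤ ids.length ∧
      reachFrom (k+1) arcs v = reachFrom k arcs v := by
    by_contra h
    have hne : ∀ k, k ≤ ids.length → reachFrom (k+1) arcs v ≠ reachFrom k arcs v :=
      fun k hk heq => h ⟨k, hk, heq⟩
    have key : ∀ k, k ≤ ids.length → k + 1 ≤ (reachFrom k arcs v).length := by
      intro k
      induction k with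
      | zero => intro _; simp [reachFrom_zero]
      | succ m ih =>
        intro hm
        have h1 := hgrow m (hne m (by omega))
        have h2 := ih (by omega)
        omega
    have := key ids.length le_rfl
    have := hlen ids.length
    omega
  obtain ⟨k, hk, hstab⟩ := hstable
  have hconst : ∀ m, k ≤ m → reachFrom m arcs v = reachFrom k arcs v := by
    intro m hm
    induction m with
    | zero =>
      cases Nat.le_zero.mp hm
      rfl
    | succ mm ih =>
      rcases Nat.lt_succ_iff_lt_or_eq.mp (Nat.lt_succ_of_le hm) with h | rfl
      · rw [reachFrom_succ, ih (by omega), ← reachFrom_succ, hstab]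
      · rfl
  have hclosed : ∀ p ∈ arcs, p.1 ∈ reachFrom ids.length arcs v →
      p.2 ∈ reachFrom ids.length arcs v := by
    intro p hp h1
    have hmem : p.2 ∈ reachStep arcs (reachFrom ids.length arcs v) :=
      (mem_reachStep _ _ _).mpr (Or.inr ⟨p, hp, rfl, h1⟩)
    rw [← reachFrom_succ] at hmem
    rwa [hconst (ids.length + 1) (by omega), ← hconst ids.length hk] at hmem
  have hv0 : v ∈ reachFrom ids.length arcs v := by
    refine reachFrom_le_subset arcs v 0 ids.length (by omega) v ?_
    rw [reachFrom_zero]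
    exact List.mem_singleton.mpr rfl
  have hind : ∀ {a b : String}, ReachP arcs a b →
      a ∈ reachFrom ids.length arcs v → b ∈ reachFrom ids.length arcs v := by
    intro a b h
    induction h with
    | refl => exact id
    | head ha r ih => exact fun haS => ih (hclosed _ ha haS)
  exact hind hr hv0

-- ---------- assembling the equivalence ----------

theorem cycle_iff (arcs : List (String × String)) (ids : List String)
    (hids : ids.Nodup) (harcs : ∀ p ∈ arcs, p.1 ∈ ids ∧ p.2 ∈ ids) :
    (arcs.any (fun uv => PySem.Set.contains (reachFrom ids.length arcs uv.2) uv.1) = true)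
      ↔ ¬ (∀ v ∈ ids, PeelP arcs v) := by
  rw [List.any_eq_true]
  constructor
  · rintro ⟨p, hp, hc⟩ hall
    have hr : ReachP arcs p.2 p.1 :=
      reach_sound arcs p.2 ids.length p.1 ((PySem.Set.contains_iff _ _).mp hc)
    exact peel_no_cycle (hall p.1 (harcs p hp).1) ⟨p.2, by rwa [Prod.mk.eta], hr⟩
  · intro hnall
    have hex : ∃ v ∈ ids, ¬ PeelP arcs v := by
      by_contra h
      refine hnall ?_
      intro v hv
      by_contra hnp
      exact h ⟨v, hv, hnp⟩
    obtain ⟨v, hv, hnp⟩ := hex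
    obtain ⟨p, hp, hr⟩ := exists_cycle_of_not_peel arcs ids hids harcs v hv hnp
    refine ⟨p, hp, (PySem.Set.contains_iff _ _).mpr ?_⟩
    exact reach_complete arcs ids hids harcs p.2 (harcs p hp).2 hr

-- ===== VERDICT (by name: the statement is the Claim_ definition above) =====
theorem validate_flow_graph_spec : Claim_equal_validate_flow_graph := by
  intro fd _dom
  show validate_flow_graph fd = validate_flow_graph_alt fd
  simp only [validate_flow_graph, validate_flow_graph_alt]
  by_cases hn : (PySem.Dict.mk fd).getD "nodes" [] = []
  · rw [if_pos hn, if_pos hn]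
  · rw [if_neg hn, if_neg hn]
    simp only [← List.countP_eq_length_filter]
    refine if_congr ?_ rfl rfl
    set nodes := (PySem.Dict.mk fd).getD "nodes" [] with hnodes_def
    set edges := (PySem.Dict.mk fd).getD "edges" [] with hedges_def
    set ids := buildNodeIds nodes with hids_def
    set arcs := edges.filterMap (arcF ids) with harcs_def
    set st := edges.foldl (edgeFoldF ids)
      (PySem.Dict.empty, ids.foldl (fun d nid => d.insert nid 0) PySem.Dict.empty) with hst_def
    have hidsnd : ids.Nodup := nodup_buildNodeIds _
    have harcs : ∀ p ∈ arcs, p.1 ∈ ids ∧ p.2 ∈ ids := arcs_mem ids edges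
    have hadj : ∀ u, st.1.getD u [] = (arcs.filter (fun p => p.1 == u)).map (·.2) := by
      intro u
      rw [hst_def, edgeFold_adj]
      simp [pysem]
      rw [← harcs_def]
    have hind : ∀ v, st.2.getD v 0 = ((arcs.filter (fun p => p.2 == v)).length : Int) := by
      intro v
      rw [hst_def, edgeFold_ind, ind0_getD]
      simp
      rw [← harcs_def]
    have hkeys : st.2.keys = ids := by
      rw [hst_def, edgeFold_keys]
      · exact ind0_keys ids hidsnd
      · intro t ht
        rw [ind0_keys ids hidsnd]
        exact ht
    have hqueue : (st.2.items.filter (fun p => p.2 == 0)).map (·.1)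
        = ids.filter (fun v => st.2.getD v 0 == 0) := by
      rw [PySem.Dict.items_eq_map_keys st.2 (by rw [hkeys]; exact hidsnd) 0, hkeys]
      rw [List.filter_map, List.map_map]
      simp [Function.comp_def]
    have h2 : ∀ v ∈ ids, st.2.getD v 0 = (inCnt arcs [] v : Int) := by
      intro v _
      rw [hind v, inCnt_nil_pop]
    have h2' : ∀ v, v ∉ ids → st.2.getD v 0 ≤ 0 := by
      intro v hv
      rw [hind v]
      have hnil : arcs.filter (fun p => p.2 == v) = [] := by
        rw [List.filter_eq_nil_iff]
        intro p hp hbeq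
        exact hv ((beq_iff_eq.mp hbeq) ▸ (harcs p hp).2)
      rw [hnil]
      simp
    have hqnd : ((st.2.items.filter (fun p => p.2 == 0)).map (·.1)).Nodup := by
      rw [hqueue]
      exact hidsnd.filter _
    have hqm : ∀ q ∈ (st.2.items.filter (fun p => p.2 == 0)).map (·.1),
        q ∈ ids ∧ q ∉ ([] : List String) := by
      intro q hq
      rw [hqueue] at hq
      exact ⟨(List.mem_filter.mp hq).1, by simp⟩
    have h4 : ∀ v ∈ ids, v ∉ ([] : List String) →
        (inCnt arcs [] v = 0 ↔ v ∈ (st.2.items.filter (fun p => p.2 == 0)).map (·.1)) := by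
      intro v hv _
      rw [hqueue, List.mem_filter, inCnt_nil_pop]
      constructor
      · intro h
        refine ⟨hv, ?_⟩
        rw [hind v, h]
        simp
      · rintro ⟨_, h⟩
        rw [hind v] at h
        have := beq_iff_eq.mp h
        exact_mod_cast this
    have hmain := kahnLoop_spec arcs ids hidsnd harcs st.1 hadj st.2
      ((st.2.items.filter (fun p => p.2 == 0)).map (·.1)) 0 []
      h2 h2' hqnd hqm h4 List.nodup_nil (by intro p hp; cases hp) (by intro p hp; cases hp) rfl
    have hcyc := cycle_iff arcs ids hidsnd harcs
    rw [hcyc]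
    exact not_congr hmain
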